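-- pv_equiv track=rewrite | github.com/WillAugustine/ESOF322 | DiscordBotCode/main.py | formatYoutubeVideo
-- ===== SOURCE A (Python) =====
-- def formatYoutubeVideo(filename):
--     output = [filename[0], ""]
--     used_dash = False
--     first_string = True
--     for i in range(1, len(filename)):
--         if filename[i].isupper() and not used_dash:
--             output[0] = output[0] + filename[i]
--         elif filename[i] == '-':
--             if not used_dash:
--                 used_dash = True
--             else:
--                 return output
--         elif filename[i] == '_':
--             if used_dash:
--                 output[1] = output[1] + " "
--             else:
--                 output[0] = output[0] + " "
--         else:
--             if used_dash:
--                 output[1] = output[1] + filename[i]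
--             else:
--                 output[0] = output[0] + filename[i]
--     return output
-- ===== SOURCE B (Python) =====
-- def formatYoutubeVideo(filename):
--     head, rest = filename[0], filename[1:]
--     before, _, after = rest.partition('-')
--     mid = after.partition('-')[0]
--     return [head + before.replace('_', ' '), mid.replace('_', ' ')]
-- ===== Notes on version B (the rewrite author's own statement) =====
-- stated objective: simpler
-- what changed: Replaced the stateful char-by-char scan with flags by a direct decomposition: keep filename[0] literally, partition the rest at the first and second dash, and map underscores to spaces in each piece.
-- outside the precondition, e.g. on formatYoutubeVideo(''): A raises IndexError, B raises IndexError
import Mathlib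
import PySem

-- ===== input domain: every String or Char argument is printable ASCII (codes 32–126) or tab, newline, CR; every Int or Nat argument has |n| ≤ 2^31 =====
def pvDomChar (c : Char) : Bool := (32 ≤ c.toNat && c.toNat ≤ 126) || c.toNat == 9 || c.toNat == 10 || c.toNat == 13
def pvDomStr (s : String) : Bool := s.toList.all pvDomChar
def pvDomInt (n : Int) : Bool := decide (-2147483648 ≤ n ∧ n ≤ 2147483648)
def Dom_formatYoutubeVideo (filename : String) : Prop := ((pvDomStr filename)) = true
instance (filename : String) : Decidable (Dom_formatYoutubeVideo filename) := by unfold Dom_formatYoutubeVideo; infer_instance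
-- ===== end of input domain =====

-- B replaces A's stateful char-by-char scan by a partition/replace decomposition (objective: simpler).

-- ===== PORT A =====
-- A's loop over range(1, len(filename)): each iteration reads filename[i]; ported as
-- structural recursion over the remaining characters with the same state
-- (output[0], output[1], used_dash); the second dash returns early, as in A.
def fyvLoopA (cs : List Char) (o0 o1 : List Char) (usedDash : Bool) : List String :=
  match cs with
  | [] => [String.mk o0, String.mk o1]
  | c :: rest =>
    if PySem.Chars.isupper c && !usedDash then fyvLoopA rest (o0 ++ [c]) o1 usedDash
    else if c = '-' then
      if !usedDash then fyvLoopA rest o0 o1 true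
      else [String.mk o0, String.mk o1]
    else if c = '_' then
      if usedDash then fyvLoopA rest o0 (o1 ++ [' ']) usedDash
      else fyvLoopA rest (o0 ++ [' ']) o1 usedDash
    else
      if usedDash then fyvLoopA rest o0 (o1 ++ [c]) usedDash
      else fyvLoopA rest (o0 ++ [c]) o1 usedDash

def formatYoutubeVideo (filename : String) : List String :=
  match filename.toList with
  | [] => []  -- filename[0] raises IndexError in Python; excluded by Pre_
  | c0 :: rest => fyvLoopA rest [c0] [] false

-- ===== PORT B =====
-- s.replace('_', ' ') ported by hand: exact for one-character old/new (each '_' becomes ' ').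
def fyvRepl (cs : List Char) : List Char := cs.map (fun c => if c = '_' then ' ' else c)

-- rest.partition('-') ported by hand for the one-character separator '-':
-- the part before the first '-' is takeWhile (· ≠ '-'), the part after it is
-- dropWhile (· ≠ '-') with the separator itself dropped (exact for this argument).
def formatYoutubeVideo_alt (filename : String) : List String :=
  match filename.toList with
  | [] => []  -- filename[0] raises IndexError in Python; excluded by Pre_
  | c0 :: rest =>
    let before := rest.takeWhile (· ≠ '-')
    let after := (rest.dropWhile (· ≠ '-')).drop 1
    let mid := after.takeWhile (· ≠ '-')
    [String.mk (c0 :: fyvRepl before), String.mk (fyvRepl mid)]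

-- ===== PRECONDITION & SPEC =====
-- Pre_ excludes only the empty string, on which A raises IndexError at filename[0].
def Pre_formatYoutubeVideo (filename : String) : Prop := filename ≠ ""
instance (filename : String) : Decidable (Pre_formatYoutubeVideo filename) := by unfold Pre_formatYoutubeVideo; infer_instance
def pvWitness_formatYoutubeVideo : String := "My_video-first_one-x"

def Spec_formatYoutubeVideo (filename : String) (out : List String) : Prop := out = formatYoutubeVideo_alt filename
instance (filename : String) (out : List String) : Decidable (Spec_formatYoutubeVideo filename out) := by unfold Spec_formatYoutubeVideo; infer_instance

-- ===== CLAIM (what is proved, stated in full; the proofs are below) =====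
def Claim_equal_formatYoutubeVideo : Prop := ∀ (filename : String), Dom_formatYoutubeVideo filename → Pre_formatYoutubeVideo filename → Spec_formatYoutubeVideo filename (formatYoutubeVideo filename)

-- ===== LEMMAS AND PROOFS =====

-- After the first dash, the loop collects chars (underscores as spaces) into o1 until the next dash.
theorem fyvLoopA_true (cs : List Char) : ∀ (o0 o1 : List Char),
    fyvLoopA cs o0 o1 true =
      [String.mk o0, String.mk (o1 ++ fyvRepl (cs.takeWhile (· ≠ '-')))] := by
  induction cs with
  | nil => intro o0 o1; simp [fyvLoopA, fyvRepl]
  | cons c rest ih =>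
    intro o0 o1
    by_cases hdash : c = '-'
    · subst hdash; simp [fyvLoopA, fyvRepl]
    · by_cases hund : c = '_'
      · subst hund
        simp [fyvLoopA, ih, fyvRepl, List.takeWhile_cons]
      · simp [fyvLoopA, hdash, hund, ih, fyvRepl, List.takeWhile_cons]

-- Before any dash, the loop collects chars (underscores as spaces) into o0 until the
-- first dash, then behaves as fyvLoopA_true on the remainder.
theorem fyvLoopA_false (cs : List Char) : ∀ (o0 o1 : List Char),
    fyvLoopA cs o0 o1 false =
      [String.mk (o0 ++ fyvRepl (cs.takeWhile (· ≠ '-'))),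
       String.mk (o1 ++ fyvRepl (((cs.dropWhile (· ≠ '-')).drop 1).takeWhile (· ≠ '-')))] := by
  induction cs with
  | nil => intro o0 o1; simp [fyvLoopA, fyvRepl]
  | cons c rest ih =>
    intro o0 o1
    by_cases hdash : c = '-'
    · subst hdash
      simp [fyvLoopA, PySem.Chars.isupper, fyvLoopA_true, fyvRepl, List.takeWhile_cons,
            List.dropWhile_cons]
    · by_cases hup : PySem.Chars.isupper c = true
      · have hund : c ≠ '_' := by
          intro h; subst h; simp [PySem.Chars.isupper] at hup
        simp [fyvLoopA, hup, hdash, hund, ih, fyvRepl, List.takeWhile_cons, List.dropWhile_cons]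
      · by_cases hund : c = '_'
        · subst hund
          simp [fyvLoopA, hup, ih, fyvRepl, List.takeWhile_cons, List.dropWhile_cons]
        · simp [fyvLoopA, hup, hdash, hund, ih, fyvRepl, List.takeWhile_cons, List.dropWhile_cons]

-- ===== VERDICT (by name: the statement is the Claim_ definition above) =====
theorem formatYoutubeVideo_spec : Claim_equal_formatYoutubeVideo := by
  intro filename _ _
  unfold Spec_formatYoutubeVideo formatYoutubeVideo formatYoutubeVideo_alt
  cases h : filename.toList with
  | nil => rfl
  | cons c0 rest => simp [fyvLoopA_false]
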